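-- pv_equiv track=rewrite | github.com/cthloconnor/panda-home-assistant | custom_components/panda_green_waste/client.py | _mark_first_service_product_selected
-- ===== SOURCE A (Python) =====
-- def _mark_first_service_product_selected(fields: list[tuple[str, str]]) -> list[tuple[str, str]]:
--     """Mirror clicking the first product row before the portal posts to details."""
--     selected_seen = False
--     marked: list[tuple[str, str]] = []
--     for key, value in fields:
--         if key.endswith(".IsSelected"):
--             if selected_seen:
--                 marked.append((key, "False"))
--             else:
--                 marked.append((key, "True"))
--                 selected_seen = True
--             continue
--         marked.append((key, value))
--     return marked
-- ===== SOURCE B (Python) =====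
-- def _mark_first_service_product_selected(fields: list[tuple[str, str]]) -> list[tuple[str, str]]:
--     """Find the first IsSelected row, then rebuild as head + True row + False-marked tail."""
--     idx = next((i for i, (k, _) in enumerate(fields) if k.endswith(".IsSelected")), None)
--     if idx is None:
--         return list(fields)
--     head = fields[:idx]
--     k0 = fields[idx][0]
--     tail = [(k, "False") if k.endswith(".IsSelected") else (k, v) for k, v in fields[idx + 1:]]
--     return head + [(k0, "True")] + tail
-- ===== Notes on version B (the rewrite author's own statement) =====
-- stated objective: alternative
-- what changed: Replaces A's single stateful pass with a carried boolean flag by a find-first-index step followed by slicing: the untouched prefix, one (key,'True') row, and a comprehension marking every later IsSelected row 'False'.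
import Mathlib
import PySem

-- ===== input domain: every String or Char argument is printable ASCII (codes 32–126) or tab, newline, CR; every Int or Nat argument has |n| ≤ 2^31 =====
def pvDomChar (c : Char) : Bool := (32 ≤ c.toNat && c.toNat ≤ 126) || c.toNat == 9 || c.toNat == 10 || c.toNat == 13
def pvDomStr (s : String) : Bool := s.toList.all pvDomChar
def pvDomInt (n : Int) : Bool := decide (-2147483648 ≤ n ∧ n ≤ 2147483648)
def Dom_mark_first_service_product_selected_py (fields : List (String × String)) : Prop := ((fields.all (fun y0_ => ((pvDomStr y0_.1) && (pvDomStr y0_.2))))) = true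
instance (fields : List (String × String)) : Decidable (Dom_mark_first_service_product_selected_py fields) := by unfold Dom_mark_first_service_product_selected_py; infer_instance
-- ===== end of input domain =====

-- ===== PORT A =====
-- B replaces A's stateful flag pass by a find-first-index + slice + tail-marking rebuild (alternative decomposition, same cost).
def mark_first_service_product_selected_py (fields : List (String × String)) : List (String × String) :=
  (fields.foldl
    (fun (st : Bool × List (String × String)) kv =>
      if PySem.Str.endswith kv.1 ".IsSelected" then
        if st.1 then (st.1, st.2 ++ [(kv.1, "False")])
        else (true, st.2 ++ [(kv.1, "True")])
      else (st.1, st.2 ++ [(kv.1, kv.2)]))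
    (false, [])).2

-- ===== PORT B =====
-- the list comprehension over fields[idx+1:]
def pvMarkTail (l : List (String × String)) : List (String × String) :=
  l.map (fun kv => if PySem.Str.endswith kv.1 ".IsSelected" then (kv.1, "False") else kv)

def mark_first_service_product_selected_py_alt (fields : List (String × String)) : List (String × String) :=
  match fields.findIdx? (fun kv => PySem.Str.endswith kv.1 ".IsSelected") with
  | none => fields
  | some i =>
      let head := PySem.List.slice fields none (some ((i : Nat) : Int))
      -- fields[idx]: idx comes from findIdx?, always in range, so getD never uses its default
      let k0 := ((PySem.List.pyGet? fields ((i : Nat) : Int)).getD ("", "")).1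
      head ++ [(k0, "True")] ++ pvMarkTail (PySem.List.slice fields (some ((i + 1 : Nat) : Int)) none)

-- ===== PRECONDITION & SPEC =====
def Spec_mark_first_service_product_selected_py (fields : List (String × String)) (out : List (String × String)) : Prop := out = mark_first_service_product_selected_py_alt fields
instance (fields : List (String × String)) (out : List (String × String)) : Decidable (Spec_mark_first_service_product_selected_py fields out) := by unfold Spec_mark_first_service_product_selected_py; infer_instance

-- ===== CLAIM (what is proved, stated in full; the proofs are below) =====
def Claim_equal_mark_first_service_product_selected_py : Prop := ∀ (fields : List (String × String)), Dom_mark_first_service_product_selected_py fields → Spec_mark_first_service_product_selected_py fields (mark_first_service_product_selected_py fields)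

-- ===== LEMMAS AND PROOFS =====
-- recursive characterisation of A's flag-carrying fold, generic in the predicate
def pvGoA (p : String × String → Bool) (seen : Bool) : List (String × String) → List (String × String)
  | [] => []
  | kv :: t =>
      if p kv then
        (if seen then (kv.1, "False") else (kv.1, "True")) :: pvGoA p true t
      else (kv.1, kv.2) :: pvGoA p seen t

theorem pvFoldA (p : String × String → Bool) (fields : List (String × String))
    (seen : Bool) (acc : List (String × String)) :
    (fields.foldl
      (fun (st : Bool × List (String × String)) kv =>
        if p kv then
          if st.1 then (st.1, st.2 ++ [(kv.1, "False")])
          else (true, st.2 ++ [(kv.1, "True")])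
        else (st.1, st.2 ++ [(kv.1, kv.2)]))
      (seen, acc)).2 = acc ++ pvGoA p seen fields := by
  induction fields generalizing seen acc with
  | nil => simp [pvGoA]
  | cons kv t ih =>
      simp only [List.foldl_cons, pvGoA]
      by_cases h : p kv = true
      · rw [if_pos h, if_pos h]
        cases seen
        · simp only [Bool.false_eq_true, if_neg (by simp : ¬(False : Prop))]
          rw [ih, List.append_assoc]; rfl
        · simp only [if_pos trivial]
          rw [ih, List.append_assoc]; rfl
      · rw [if_neg h, if_neg h, ih, List.append_assoc]; rfl

theorem pvGoA_true (t : List (String × String)) :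
    pvGoA (fun kv => PySem.Str.endswith kv.1 ".IsSelected") true t = pvMarkTail t := by
  induction t with
  | nil => rfl
  | cons kv r ih =>
      simp only [pvGoA, pvMarkTail, List.map_cons]
      by_cases h : PySem.Str.endswith kv.1 ".IsSelected" = true
      · rw [if_pos h, if_pos h, ih]; rfl
      · rw [if_neg h, if_neg h, ih]; rfl

theorem pvMain (fields : List (String × String)) :
    pvGoA (fun kv => PySem.Str.endswith kv.1 ".IsSelected") false fields =
      mark_first_service_product_selected_py_alt fields := by
  induction fields with
  | nil => rfl
  | cons kv t ih =>
      unfold mark_first_service_product_selected_py_alt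
      rw [List.findIdx?_cons]
      simp only [pvGoA]
      by_cases hk : PySem.Str.endswith kv.1 ".IsSelected" = true
      · rw [if_pos hk, if_pos hk]
        simp only [Bool.false_eq_true, if_neg (by simp : ¬(False : Prop))]
        simp only [PySem.List.slice_to_natCast, PySem.List.slice_from_natCast,
                   PySem.List.pyGet?_natCast, List.take_zero, List.drop_succ_cons,
                   List.drop_zero, List.getElem?_cons_zero, Option.getD_some,
                   List.nil_append, List.cons_append]
        rw [pvGoA_true]
      · rw [if_neg hk, if_neg hk]
        unfold mark_first_service_product_selected_py_alt at ih
        cases hf : t.findIdx? (fun kv => PySem.Str.endswith kv.1 ".IsSelected") with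
        | none =>
            rw [hf] at ih
            rw [ih]
            simp only [Option.map_none]
        | some i =>
            rw [hf] at ih
            rw [ih]
            simp only [Option.map_some]
            simp only [PySem.List.slice_to_natCast, PySem.List.slice_from_natCast,
                       PySem.List.pyGet?_natCast, List.take_succ_cons, List.drop_succ_cons,
                       List.getElem?_cons_succ, List.cons_append]

-- ===== VERDICT (by name: the statement is the Claim_ definition above) =====
theorem mark_first_service_product_selected_py_spec : Claim_equal_mark_first_service_product_selected_py := by
  intro fields _
  unfold Spec_mark_first_service_product_selected_py mark_first_service_product_selected_py
  exact (pvFoldA (fun kv => PySem.Str.endswith kv.1 ".IsSelected") fields false []).trans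
    (by rw [List.nil_append, pvMain fields])
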